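-- pv_equiv track=rewrite | github.com/Yosuke-Hayakawa/BaseSystem_YpVer | 波形解析/scripts/ng_check.py | decode_ng_bits
-- ===== SOURCE A (Python) =====
-- def decode_ng_bits(ng_number1, ng_number2, ng_number3):
-- 	"""ng_number1～3のビットマスクからNG番号リストを返す"""
-- 	ngs = []
-- 	for i in range(32):
-- 		if int(ng_number1) & (1 << i):
-- 			ngs.append(i + 1)       # NG1～32
-- 	for i in range(32):
-- 		if int(ng_number2) & (1 << i):
-- 			ngs.append(i + 33)      # NG33～64
-- 	for i in range(32):
-- 		if int(ng_number3) & (1 << i):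
-- 			ngs.append(i + 65)      # NG65～96
-- 	return sorted(ngs)
-- ===== SOURCE B (Python) =====
-- # Table-driven decode: one 96-bit integer, 24 nibble-chunk table lookups.
-- _NIBBLE = [[j for j in range(4) if (v >> j) & 1] for v in range(16)]
--
--
-- def decode_ng_bits(ng_number1, ng_number2, ng_number3):
--     """ng_number1～3のビットマスクからNG番号リストを返す"""
--     M = 0xFFFFFFFF
--     big = (int(ng_number1) & M) | (int(ng_number2) & M) << 32 | (int(ng_number3) & M) << 64
--     out = []
--     for c in range(24):
--         for j in _NIBBLE[(big >> (4 * c)) & 15]: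
--             out.append(4 * c + j + 1)
--     return out
-- ===== Notes on version B (the rewrite author's own statement) =====
-- stated objective: alternative
-- what changed: B replaces A's 96 individual bit tests plus a final sort with a table-driven decoder: a precomputed 16-entry nibble lookup table, the three masks packed into one 96-bit integer, decoded in 24 nibble chunks whose table entries are emitted already in ascending order so no sort is needed.
import Mathlib
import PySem

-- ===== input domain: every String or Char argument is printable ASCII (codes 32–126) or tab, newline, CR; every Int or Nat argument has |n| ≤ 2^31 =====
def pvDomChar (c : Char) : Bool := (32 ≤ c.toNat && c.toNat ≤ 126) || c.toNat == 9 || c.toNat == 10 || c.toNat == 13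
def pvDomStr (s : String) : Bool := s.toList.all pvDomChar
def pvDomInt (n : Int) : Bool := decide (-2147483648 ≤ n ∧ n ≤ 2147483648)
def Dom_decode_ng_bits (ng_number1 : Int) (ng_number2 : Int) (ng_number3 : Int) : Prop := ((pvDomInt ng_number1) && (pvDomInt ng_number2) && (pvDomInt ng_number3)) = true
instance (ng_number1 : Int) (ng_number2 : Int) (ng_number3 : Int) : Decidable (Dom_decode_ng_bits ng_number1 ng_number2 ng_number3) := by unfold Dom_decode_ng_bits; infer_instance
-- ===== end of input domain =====

-- B replaces A's 96 individual bit tests plus a final sort with a table-driven decoder: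
-- a precomputed 16-entry nibble table, the three masks packed into one 96-bit integer,
-- decoded in 24 ascending nibble chunks, so no sort is needed (objective: alternative).

-- ===== PORT A =====
def decode_ng_bits (ng_number1 : Int) (ng_number2 : Int) (ng_number3 : Int) : List Int :=
  let ngs : List Int := []
  let ngs := (List.range 32).foldl
    (fun acc (i : Nat) => if PySem.Int.band ng_number1 ((1 : Int) <<< i) ≠ 0 then acc ++ [(i : Int) + 1] else acc) ngs
  let ngs := (List.range 32).foldl
    (fun acc (i : Nat) => if PySem.Int.band ng_number2 ((1 : Int) <<< i) ≠ 0 then acc ++ [(i : Int) + 33] else acc) ngs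
  let ngs := (List.range 32).foldl
    (fun acc (i : Nat) => if PySem.Int.band ng_number3 ((1 : Int) <<< i) ≠ 0 then acc ++ [(i : Int) + 65] else acc) ngs
  PySem.List.sorted ngs (fun x => x)

-- ===== PORT B =====
-- _NIBBLE = [[j for j in range(4) if (v >> j) & 1] for v in range(16)]
def pvNibbleTable : List (List Nat) :=
  (List.range 16).map (fun v => (List.range 4).filter (fun j => (v >>> j) &&& 1 = 1))

def decode_ng_bits_alt (ng_number1 : Int) (ng_number2 : Int) (ng_number3 : Int) : List Int :=
  let M : Int := 4294967295
  let big : Nat := (PySem.Int.band ng_number1 M).toNat |||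
    ((PySem.Int.band ng_number2 M).toNat <<< 32) ||| ((PySem.Int.band ng_number3 M).toNat <<< 64)
  (List.range 24).foldl
    (fun acc (c : Nat) =>
      acc ++ (pvNibbleTable.getD ((big >>> (4 * c)) &&& 15) []).map
        (fun (j : Nat) => ((4 * c + j : Nat) : Int) + 1)) []

-- ===== PRECONDITION & SPEC =====
def Spec_decode_ng_bits (ng_number1 : Int) (ng_number2 : Int) (ng_number3 : Int) (out : List Int) : Prop := out = decode_ng_bits_alt ng_number1 ng_number2 ng_number3
instance (ng_number1 : Int) (ng_number2 : Int) (ng_number3 : Int) (out : List Int) : Decidable (Spec_decode_ng_bits ng_number1 ng_number2 ng_number3 out) := by unfold Spec_decode_ng_bits; infer_instance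

-- ===== CLAIM =====
def Claim_equal_decode_ng_bits : Prop := ∀ (ng_number1 : Int) (ng_number2 : Int) (ng_number3 : Int), Dom_decode_ng_bits ng_number1 ng_number2 ng_number3 → Spec_decode_ng_bits ng_number1 ng_number2 ng_number3 (decode_ng_bits ng_number1 ng_number2 ng_number3)

-- ===== LEMMAS AND PROOFS =====

-- A's append-if loop is a filter-map
theorem pv_foldl_append {α β : Type} (p : α → Prop) [DecidablePred p] (f : α → β) :
    ∀ (l : List α) (acc : List β),
      l.foldl (fun acc x => if p x then acc ++ [f x] else acc) acc
        = acc ++ (l.filter (fun x => decide (p x))).map f := by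
  intro l
  induction l with
  | nil => simp
  | cons x t ih =>
    intro acc
    by_cases h : p x <;> simp [h, ih]

theorem pv_neg_eq_negSucc (n : Int) (h : ¬ 0 ≤ n) : n = Int.negSucc ((-n - 1).toNat) := by
  omega

-- Python's truthiness test 'n & (1 << i)' is bit i of n (two's complement)
theorem pv_test_ne (n : Int) (i : Nat) :
    (PySem.Int.band n ((1 : Int) <<< i) ≠ 0) ↔ n.testBit i = true := by
  have hpow : ((1 : Int) <<< i) = ((2 ^ i : Nat) : Int) := by
    rw [Int.shiftLeft_eq]; push_cast; ring
  by_cases h : 0 ≤ n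
  · rw [hpow, PySem.Int.band_of_nonneg h (by positivity)]
    have ht : n.testBit i = n.toNat.testBit i := by
      rcases n with a | a
      · simp [Int.testBit]
      · omega
    rw [ht]
    simp only [Int.toNat_natCast, Nat.and_two_pow]
    rcases n.toNat.testBit i <;> simp
  · set c := (-n - 1).toNat with hc
    have hneg : n = Int.negSucc c := pv_neg_eq_negSucc n h
    have ht : n.testBit i = !(c.testBit i) := by rw [hneg]; simp [Int.testBit]
    rw [hpow, ht]
    unfold PySem.Int.band
    rw [if_neg h, if_pos (by positivity), Int.toNat_natCast, Nat.land_comm, Nat.and_two_pow]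
    rcases c.testBit i <;> simp <;> omega

-- bit i of the Python value  n & 0xFFFFFFFF  (two's complement, 32-bit window)
theorem pv_testBit_mask (n : Int) (i : Nat) :
    (PySem.Int.band n 4294967295).toNat.testBit i = (decide (i < 32) && n.testBit i) := by
  by_cases h : 0 ≤ n
  · rw [PySem.Int.band_of_nonneg h (by norm_num)]
    have ht : n.testBit i = n.toNat.testBit i := by
      rcases n with a | a
      · simp [Int.testBit]
      · omega
    have h1 : (4294967295 : Int).toNat = 2 ^ 32 - 1 := by decide
    simp only [Int.toNat_natCast, h1, Nat.testBit_land, Nat.testBit_two_pow_sub_one, ht]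
    rw [Bool.and_comm]
  · set c := (-n - 1).toNat with hc
    have hneg : n = Int.negSucc c := pv_neg_eq_negSucc n h
    have ht : n.testBit i = !(c.testBit i) := by rw [hneg]; simp [Int.testBit]
    unfold PySem.Int.band
    rw [if_neg h, if_pos (by norm_num)]
    have h1 : (4294967295 : Int).toNat = 2 ^ 32 - 1 := by decide
    have h2 : (2 ^ 32 - 1 : Nat) &&& c = c % 2 ^ 32 := by
      rw [Nat.land_comm]; exact Nat.and_two_pow_sub_one_eq_mod c 32
    have h3 : (2 ^ 32 - 1) - c % 2 ^ 32 = 2 ^ 32 - (c % 2 ^ 32 + 1) := by omega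
    have h4 : c % 2 ^ 32 < 2 ^ 32 := Nat.mod_lt _ (by norm_num)
    rw [Int.toNat_natCast, h1, h2, h3, Nat.testBit_two_pow_sub_succ h4,
      Nat.testBit_mod_two_pow, ht]
    rcases hd : decide (i < 32) <;> simp

-- the masked value fits in 32 bits
theorem pv_mask_lt (n : Int) : (PySem.Int.band n 4294967295).toNat < 2 ^ 32 := by
  unfold PySem.Int.band
  split_ifs with h1 h2 h2 <;> simp <;> try omega
  · calc n.toNat &&& (4294967295 : Int).toNat ≤ (4294967295 : Int).toNat := Nat.and_le_right
    _ < 2 ^ 32 := by norm_num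

-- the table lookup at a nibble value v < 16 is the nibble's set-bit list
theorem pv_nibble_lookup : ∀ v < 16,
    pvNibbleTable.getD v [] = (List.range 4).filter (fun j => (v >>> j) &&& 1 = 1) := by
  decide

-- the filter condition of the table is testBit
theorem pv_cond_testBit (v j : Nat) : decide ((v >>> j) &&& 1 = 1) = v.testBit j := by
  rw [Nat.and_one_is_mod]
  rcases Nat.mod_two_eq_zero_or_one (v >>> j) with h | h <;>
    simp [Nat.testBit, Nat.land_comm, Nat.and_one_is_mod, h]

-- B's chunk loop decodes the first 4*k bits of big, in ascending order
theorem pv_chunks (big : Nat) : ∀ k : Nat,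
    (List.range k).foldl
      (fun acc (c : Nat) =>
        acc ++ (pvNibbleTable.getD ((big >>> (4 * c)) &&& 15) []).map
          (fun (j : Nat) => ((4 * c + j : Nat) : Int) + 1)) []
    = ((List.range (4 * k)).filter (fun j => big.testBit j)).map (fun (j : Nat) => (j : Int) + 1) := by
  intro k
  induction k with
  | zero => simp
  | succ k ih =>
    rw [List.range_succ, List.foldl_append, ih]
    simp only [List.foldl_cons, List.foldl_nil]
    have hnib : (big >>> (4 * k)) &&& 15 < 16 := by
      have : (big >>> (4 * k)) &&& 15 ≤ 15 := Nat.and_le_right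
      omega
    rw [pv_nibble_lookup _ hnib]
    have hrange : List.range (4 * (k + 1)) = List.range (4 * k) ++ (List.range 4).map (fun i => 4 * k + i) := by
      have : 4 * (k + 1) = 4 * k + 4 := by ring
      rw [this, List.range_add]
    rw [hrange, List.filter_append, List.map_append]
    congr 1
    rw [List.filter_map, List.map_map]
    have hfc : (List.range 4).filter (fun j => (((big >>> (4 * k)) &&& 15) >>> j) &&& 1 = 1)
        = (List.range 4).filter ((fun j => big.testBit j) ∘ fun i => 4 * k + i) := by
      apply List.filter_congr
      intro x hx
      have hx4 : x < 4 := List.mem_range.mp hx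
      have hbit : ((big >>> (4 * k)) &&& 15).testBit x = big.testBit (4 * k + x) := by
        have h15 : (15 : Nat) = 2 ^ 4 - 1 := by decide
        rw [Nat.testBit_land, h15, Nat.testBit_two_pow_sub_one, Nat.testBit_shiftRight]
        simp [hx4, Nat.add_comm]
      simp only [Function.comp_apply, pv_cond_testBit, hbit]
    rw [hfc]
    apply List.map_congr_left
    intro a _
    simp only [Function.comp_apply]

-- A's per-mask block as a filter over testBit of the masked value
theorem pv_blockA (n : Int) (off : Int) :
    ((List.range 32).filter (fun (i : Nat) => decide (PySem.Int.band n ((1 : Int) <<< i) ≠ 0))).map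
        (fun (i : Nat) => (i : Int) + off)
      = ((List.range 32).filter (fun i => (PySem.Int.band n 4294967295).toNat.testBit i)).map
        (fun (i : Nat) => (i : Int) + off) := by
  congr 1
  apply List.filter_congr
  intro x hx
  have hx32 : x < 32 := List.mem_range.mp hx
  simp only [pv_testBit_mask, hx32, decide_true, Bool.true_and, decide_eq_decide, pv_test_ne]
  simp

-- the decoded list is ascending
theorem pv_R_pairwise (big : Nat) :
    (((List.range 96).filter (fun j => big.testBit j)).map (fun (j : Nat) => (j : Int) + 1)).Pairwise (· ≤ ·) := by
  refine List.Pairwise.map _ ?_ (List.Pairwise.filter _ List.pairwise_lt_range)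
  intro a b hab
  omega

-- ===== VERDICT =====
theorem decode_ng_bits_spec : Claim_equal_decode_ng_bits := by
  intro n1 n2 n3 _
  unfold Spec_decode_ng_bits decode_ng_bits decode_ng_bits_alt
  simp only
  set a := (PySem.Int.band n1 4294967295).toNat with hadef
  set b := (PySem.Int.band n2 4294967295).toNat with hbdef
  set c := (PySem.Int.band n3 4294967295).toNat with hcdef
  have ha := pv_mask_lt n1
  have hb := pv_mask_lt n2
  have hc := pv_mask_lt n3
  rw [pv_chunks (a ||| b <<< 32 ||| c <<< 64) 24]
  rw [pv_foldl_append (fun (i : Nat) => PySem.Int.band n1 ((1 : Int) <<< i) ≠ 0) (fun (i : Nat) => (i : Int) + 1),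
    pv_foldl_append (fun (i : Nat) => PySem.Int.band n2 ((1 : Int) <<< i) ≠ 0) (fun (i : Nat) => (i : Int) + 33),
    pv_foldl_append (fun (i : Nat) => PySem.Int.band n3 ((1 : Int) <<< i) ≠ 0) (fun (i : Nat) => (i : Int) + 65)]
  rw [List.nil_append, pv_blockA n1 1, pv_blockA n2 33, pv_blockA n3 65]
  have hL : ((List.range (4 * 24)).filter (fun j => (a ||| b <<< 32 ||| c <<< 64).testBit j)).map
        (fun (j : Nat) => (j : Int) + 1)
      = ((List.range 32).filter (fun i => a.testBit i)).map (fun (i : Nat) => (i : Int) + 1)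
        ++ ((List.range 32).filter (fun i => b.testBit i)).map (fun (i : Nat) => (i : Int) + 33)
        ++ ((List.range 32).filter (fun i => c.testBit i)).map (fun (i : Nat) => (i : Int) + 65) := by
    have hsplit : List.range (4 * 24) = List.range 32 ++ (List.range 32).map (fun i => 32 + i)
        ++ (List.range 32).map (fun i => 64 + i) := by
      decide
    rw [hsplit, List.filter_append, List.filter_append, List.map_append, List.map_append]
    congr 1
    · congr 1
      · -- window 0: bits 0..31 come from a
        congr 1
        apply List.filter_congr
        intro x hx
        have hx32 : x < 32 := List.mem_range.mp hx
        have hbx : (b <<< 32).testBit x = false := by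
          rw [Nat.testBit_shiftLeft]
          have : decide (32 ≤ x) = false := by simp; omega
          simp [this]
        have hcx : (c <<< 64).testBit x = false := by
          rw [Nat.testBit_shiftLeft]
          have : decide (64 ≤ x) = false := by simp; omega
          simp [this]
        simp only [Nat.testBit_or, hbx, hcx, Bool.or_false]
      · -- window 1: bits 32..63 come from b
        rw [List.filter_map, List.map_map]
        congr 1
        · funext j
          simp only [Function.comp_apply]
          push_cast
          ring
        · apply List.filter_congr
          intro x hx
          have hx32 : x < 32 := List.mem_range.mp hx
          have hax : a.testBit (32 + x) = false :=
            Nat.testBit_eq_false_of_lt (by calc a < 2 ^ 32 := ha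
              _ ≤ 2 ^ (32 + x) := Nat.pow_le_pow_right (by norm_num) (by omega))
          have hbx : (b <<< 32).testBit (32 + x) = b.testBit x := by
            rw [Nat.testBit_shiftLeft]
            simp
          have hcx : (c <<< 64).testBit (32 + x) = false := by
            rw [Nat.testBit_shiftLeft]
            have : decide (64 ≤ 32 + x) = false := by simp; omega
            simp [this]
          simp only [Function.comp_apply, Nat.testBit_or, hax, hbx, hcx, Bool.false_or, Bool.or_false]
    · -- window 2: bits 64..95 come from c
      rw [List.filter_map, List.map_map]
      congr 1
      · funext j
        simp only [Function.comp_apply]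
        push_cast
        ring
      · apply List.filter_congr
        intro x hx
        have hx32 : x < 32 := List.mem_range.mp hx
        have hax : a.testBit (64 + x) = false :=
          Nat.testBit_eq_false_of_lt (by calc a < 2 ^ 32 := ha
            _ ≤ 2 ^ (64 + x) := Nat.pow_le_pow_right (by norm_num) (by omega))
        have hbx : (b <<< 32).testBit (64 + x) = false := by
          rw [Nat.testBit_shiftLeft]
          have h32 : b.testBit (64 + x - 32) = false :=
            Nat.testBit_eq_false_of_lt (by calc b < 2 ^ 32 := hb
              _ ≤ 2 ^ (64 + x - 32) := Nat.pow_le_pow_right (by norm_num) (by omega))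
          simp [h32]
        have hcx : (c <<< 64).testBit (64 + x) = c.testBit x := by
          rw [Nat.testBit_shiftLeft]
          simp
        simp only [Function.comp_apply, Nat.testBit_or, hax, hbx, hcx, Bool.false_or]
  rw [hL]
  apply PySem.List.sorted_eq_self_of_pairwise
  have hP := pv_R_pairwise (a ||| b <<< 32 ||| c <<< 64)
  rw [hL] at hP
  simpa using hP
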